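-- pv_equiv track=rewrite | github.com/fransholwerda/AdventOfCode | 2017/Day04/star_two.py | valid_word
-- ===== SOURCE A (Python) =====
-- def valid_word(word, words_used):
-- 	for word_check in words_used:
-- 		if len(word) != len(word_check):
-- 			continue
-- 		else:
-- 			anagram = True
-- 			for letter in word:
-- 				if word.count(letter) != word_check.count(letter):
-- 					anagram = False
-- 			if anagram:
-- 				return False
-- 	return True
-- ===== SOURCE B (Python) =====
-- def valid_word(word, words_used):
--     seen = {tuple(sorted(w)) for w in words_used}
--     return tuple(sorted(word)) not in seen
-- ===== Notes on version B (the rewrite author's own statement) =====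
-- stated objective: idiomatic
-- what changed: A's per-candidate inner loop comparing letter counts is replaced by building a set of sorted-letter signatures of words_used once and testing membership of the input word's signature.
import Mathlib
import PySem

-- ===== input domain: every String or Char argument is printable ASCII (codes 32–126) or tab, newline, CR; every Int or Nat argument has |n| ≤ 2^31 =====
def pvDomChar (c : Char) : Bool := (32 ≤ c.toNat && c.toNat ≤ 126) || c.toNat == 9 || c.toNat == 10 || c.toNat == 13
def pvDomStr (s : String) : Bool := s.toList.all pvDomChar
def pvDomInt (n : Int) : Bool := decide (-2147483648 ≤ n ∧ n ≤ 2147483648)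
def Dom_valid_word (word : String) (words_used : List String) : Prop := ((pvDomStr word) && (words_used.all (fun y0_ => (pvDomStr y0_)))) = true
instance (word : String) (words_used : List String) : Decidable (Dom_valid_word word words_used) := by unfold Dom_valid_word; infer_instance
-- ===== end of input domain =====

-- B replaces A's nested letter-count scan over every used word by one set of sorted-letter
-- signatures and a single membership test (idiomatic; equivalence proved, no speed claim).

-- ===== PORT A =====
-- inner 'for letter in word' loop: the anagram flag
def validWordAnagram (w v : List Char) : Bool :=
  w.foldl (fun anagram letter =>
    if PySem.Chars.count w [letter] ≠ PySem.Chars.count v [letter] then false else anagram) true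

-- outer 'for word_check in words_used' loop
def validWordLoop (w : List Char) : List String → Bool
  | [] => true
  | wc :: rest =>
    if w.length ≠ wc.toList.length then validWordLoop w rest
    else if validWordAnagram w wc.toList then false
    else validWordLoop w rest

def valid_word (word : String) (words_used : List String) : Bool :=
  validWordLoop word.toList words_used

-- ===== PORT B =====
-- seen = {tuple(sorted(w)) for w in words_used}; return tuple(sorted(word)) not in seen
def valid_word_alt (word : String) (words_used : List String) : Bool :=
  let seen : PySem.Set (List Char) :=
    PySem.Set.ofList (words_used.map (fun w => PySem.List.sorted w.toList (fun c => c) false))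
  !(PySem.Set.contains seen (PySem.List.sorted word.toList (fun c => c) false))

-- ===== PRECONDITION & SPEC =====
def Spec_valid_word (word : String) (words_used : List String) (out : Bool) : Prop := out = valid_word_alt word words_used
instance (word : String) (words_used : List String) (out : Bool) : Decidable (Spec_valid_word word words_used out) := by unfold Spec_valid_word; infer_instance

-- ===== CLAIM (what is proved, stated in full; the proofs are below) =====
def Claim_equal_valid_word : Prop := ∀ (word : String) (words_used : List String), Dom_valid_word word words_used → Spec_valid_word word words_used (valid_word word words_used)

-- ===== LEMMAS AND PROOFS =====

-- str.count with a single-character needle is List.count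
theorem countGo_singleton (c : Char) : ∀ (fuel : Nat) (rest : List Char) (acc : Nat),
    rest.length ≤ fuel → PySem.Chars.count.go [c] fuel rest acc = acc + rest.count c := by
  intro fuel
  induction fuel with
  | zero =>
    intro rest acc h
    cases rest with
    | nil => simp [PySem.Chars.count.go]
    | cons x t => simp at h
  | succ n ih =>
    intro rest acc h
    cases rest with
    | nil => simp [PySem.Chars.count.go]
    | cons x t =>
      simp only [PySem.Chars.count.go]
      by_cases hcx : c = x
      · subst hcx
        simp only [List.isPrefixOf, BEq.rfl, Bool.and_self, if_true]
        rw [ih (List.drop [c].length (c :: t)) (acc + 1) (by simp at h ⊢; omega)]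
        simp
        omega
      · have : ([c].isPrefixOf (x :: t)) = false := by
          simp [List.isPrefixOf, hcx]
        rw [this]
        simp only [if_false, Bool.false_eq_true]
        rw [ih t acc (by simp at h; omega)]
        simp [Ne.symm hcx]

theorem chars_count_singleton (w : List Char) (c : Char) :
    PySem.Chars.count w [c] = w.count c := by
  simp only [PySem.Chars.count, List.isEmpty_cons, if_false, Bool.false_eq_true]
  simpa using countGo_singleton c w.length w 0 le_rfl

-- the 'anagram = False' flag loop is an all-quantifier
theorem foldl_flag (p : Char → Prop) [DecidablePred p] (l : List Char) :
    ∀ acc : Bool, l.foldl (fun an c => if p c then false else an) acc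
      = (acc && l.all (fun c => !decide (p c))) := by
  induction l with
  | nil => intro acc; simp
  | cons x t ih =>
    intro acc
    simp only [List.foldl_cons, List.all_cons, ih]
    by_cases hx : p x <;> simp [hx]

theorem list_sum_count (l : List Char) : ∑ a ∈ l.toFinset, l.count a = l.length := by
  simpa using Multiset.toFinset_sum_count_eq (l : Multiset Char)

-- equal length plus equal counts on w's own letters forces a permutation
theorem perm_of_length_eq_count (w v : List Char) (hlen : w.length = v.length)
    (hc : ∀ c ∈ w, w.count c = v.count c) : w.Perm v := by
  rw [List.perm_iff_count]
  intro c
  by_cases hcw : c ∈ w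
  · exact hc c hcw
  · have hcv : c ∉ v := by
      by_contra hv
      have hsub : w.toFinset ⊆ v.toFinset := by
        intro a ha
        rw [List.mem_toFinset] at ha ⊢
        have h1 : 0 < v.count a := by
          rw [← hc a ha]; exact List.count_pos_iff.mpr ha
        exact List.count_pos_iff.mp h1
      have hlt : ∑ a ∈ w.toFinset, v.count a < ∑ a ∈ v.toFinset, v.count a :=
        Finset.sum_lt_sum_of_subset hsub (List.mem_toFinset.mpr hv)
          (by simp [hcw]) (List.count_pos_iff.mpr hv) (fun _ _ _ => Nat.zero_le _)
      have h2 : ∑ a ∈ w.toFinset, v.count a = ∑ a ∈ w.toFinset, w.count a :=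
        Finset.sum_congr rfl (fun a ha => (hc a (List.mem_toFinset.mp ha)).symm)
      rw [h2, list_sum_count, list_sum_count] at hlt
      omega
    simp [List.count_eq_zero_of_not_mem, hcw, hcv]

theorem anagram_iff (w v : List Char) (hlen : w.length = v.length) :
    validWordAnagram w v = true ↔ w.Perm v := by
  unfold validWordAnagram
  rw [foldl_flag (fun letter => PySem.Chars.count w [letter] ≠ PySem.Chars.count v [letter])]
  simp only [Bool.true_and, List.all_eq_true, chars_count_singleton, decide_not,
    Bool.not_not, decide_eq_true_eq, ne_eq]
  constructor
  · intro h; exact perm_of_length_eq_count w v hlen h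
  · intro h c _; exact h.count_eq c

-- A's outer loop computes exactly "my signature is not among the used signatures"
theorem loop_eq_not_mem (w : List Char) (L : List String) :
    validWordLoop w L
      = !decide ((PySem.List.sorted w (fun c => c) false)
          ∈ L.map (fun s => PySem.List.sorted s.toList (fun c => c) false)) := by
  induction L with
  | nil => simp [validWordLoop]
  | cons wc rest ih =>
    by_cases hlen : w.length = wc.toList.length
    · by_cases han : validWordAnagram w wc.toList = true
      · have hperm := (anagram_iff w wc.toList hlen).mp han
        have heq : PySem.List.sorted w (fun c => c) false
            = PySem.List.sorted wc.toList (fun c => c) false :=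
          (PySem.List.sorted_id_eq_sorted_id_iff_perm ..).mpr hperm
        simp only [validWordLoop]
        rw [if_neg (by simp [hlen]), if_pos han]
        simp [List.mem_cons, heq]
      · have hne : PySem.List.sorted w (fun c => c) false
            ≠ PySem.List.sorted wc.toList (fun c => c) false := by
          intro he
          exact han ((anagram_iff w wc.toList hlen).mpr
            ((PySem.List.sorted_id_eq_sorted_id_iff_perm ..).mp he))
        simp only [validWordLoop]
        rw [if_neg (by simp [hlen]), if_neg han, ih]
        simp [List.mem_cons, hne]
    · have hne : PySem.List.sorted w (fun c => c) false
          ≠ PySem.List.sorted wc.toList (fun c => c) false := by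
        intro he
        exact hlen (((PySem.List.sorted_id_eq_sorted_id_iff_perm ..).mp he).length_eq)
      simp only [validWordLoop]
      rw [if_pos (by simpa using hlen), ih]
      simp [List.mem_cons, hne]

-- ===== VERDICT (by name: the statement is the Claim_ definition above) =====
theorem valid_word_spec : Claim_equal_valid_word := by
  intro word words_used _
  unfold Spec_valid_word valid_word valid_word_alt
  rw [loop_eq_not_mem]
  congr 1
  rw [PySem.Set.contains_eq_decide]
  simp [PySem.Set.mem_ofList]
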